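-- pv_equiv track=rewrite | github.com/ShreyaMangal/Cryptography_Algos | Ciphers.py | create_keyMatrix
-- ===== SOURCE A (Python) =====
-- def create_keyMatrix(key, key_len):
--     keyMatrix = [[0] * key_len for i in range(key_len)]
--     k = 0
--     for i in range(key_len):
--         for j in range(key_len):
--             keyMatrix[i][j] = ord(key[k]) % 65
--             k += 1
--
--     return keyMatrix
-- ===== SOURCE B (Python) =====
-- def create_keyMatrix(key, key_len):
--     # Different decomposition: no preallocated matrix and no running index counter.
--     # Guard the degenerate size, map the needed characters to codes once, then
--     # consume the code list with a while-loop that slices off one row at a time.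
--     if key_len <= 0:
--         return []
--     codes = [ord(c) % 65 for c in key[:key_len * key_len]]
--     rows = []
--     while codes:
--         rows.append(codes[:key_len])
--         codes = codes[key_len:]
--     return rows
-- ===== Notes on version B (the rewrite author's own statement) =====
-- stated objective: alternative
-- what changed: Replaces A's preallocated key_len x key_len zero matrix filled in place by nested index loops with a running counter k by a guard-map-chunk pipeline: map the needed characters to codes once, then a while-loop consumes the code list, slicing off one row per iteration with no indices at all.
import Mathlib
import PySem

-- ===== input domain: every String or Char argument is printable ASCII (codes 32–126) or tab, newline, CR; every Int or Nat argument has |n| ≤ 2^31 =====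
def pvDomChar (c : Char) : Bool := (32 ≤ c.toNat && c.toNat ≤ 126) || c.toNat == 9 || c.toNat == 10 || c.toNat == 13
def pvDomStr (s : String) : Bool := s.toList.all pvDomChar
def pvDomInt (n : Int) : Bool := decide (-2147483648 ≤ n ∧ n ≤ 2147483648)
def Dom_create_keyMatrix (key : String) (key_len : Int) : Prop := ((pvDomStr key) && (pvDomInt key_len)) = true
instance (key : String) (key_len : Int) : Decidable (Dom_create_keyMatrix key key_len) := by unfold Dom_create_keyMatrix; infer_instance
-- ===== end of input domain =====

-- B replaces A's preallocated matrix filled in place through nested index loops with a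
-- guard-map-chunk pipeline (map the characters to codes once, then a while-loop slices one
-- row off the code list per iteration); alternative decomposition, not faster.

-- ===== PORT A =====
def create_keyMatrix (key : String) (key_len : Int) : List (List Int) :=
  let keyMatrix : List (List Int) :=
    (PySem.List.pyRange 0 key_len 1).map (fun _ =>
      (PySem.List.pyRange 0 key_len 1).map (fun _ => (0 : Int)))
  let res :=
    (PySem.List.pyRange 0 key_len 1).foldl (fun (st : List (List Int) × Int) i =>
      (PySem.List.pyRange 0 key_len 1).foldl (fun st j =>
        -- keyMatrix[i][j] = ord(key[k]) % 65; k += 1  (index in range under Pre_, so the getD default is never used)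
        (st.1.set i.toNat ((st.1.getD i.toNat []).set j.toNat
            (PySem.Int.mod (((PySem.Str.pyGet? key st.2).getD ' ').toNat : Int) 65)),
         st.2 + 1)) st)
      (keyMatrix, 0)
  res.1

-- ===== PORT B =====
-- the while-loop 'while codes: rows.append(codes[:key_len]); codes = codes[key_len:]'.
-- fuel is a totality guard only: each iteration removes key_len ≥ 1 elements at the only
-- call site (reached under the 'key_len <= 0' guard), so fuel = codes.length never runs out.
def pvChunkLoop (n : Int) (fuel : Nat) (codes : List Int) (rows : List (List Int)) : List (List Int) :=
  match fuel with
  | 0 => rows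
  | f + 1 =>
    if codes = [] then rows
    else pvChunkLoop n f (PySem.List.slice codes (some n) none)
           (rows ++ [PySem.List.slice codes none (some n)])

def create_keyMatrix_alt (key : String) (key_len : Int) : List (List Int) :=
  if key_len ≤ 0 then []
  else
    let codes : List Int :=
      (PySem.List.slice key.toList none (some (key_len * key_len))).map
        (fun c => PySem.Int.mod ((c.toNat : Int)) 65)
    pvChunkLoop key_len codes.length codes []

-- ===== PRECONDITION & SPEC =====
-- Pre_ excludes exactly the inputs with 0 < key_len and fewer than key_len² characters in
-- key: there Python A raises IndexError reading key[k] past the end.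
def Pre_create_keyMatrix (key : String) (key_len : Int) : Prop :=
  key_len ≤ 0 ∨ key_len * key_len ≤ PySem.Str.len key
instance (key : String) (key_len : Int) : Decidable (Pre_create_keyMatrix key key_len) := by
  unfold Pre_create_keyMatrix; infer_instance
def pvWitness_create_keyMatrix : String × Int := ("abcd", 2)

def Spec_create_keyMatrix (key : String) (key_len : Int) (out : List (List Int)) : Prop := out = create_keyMatrix_alt key key_len
instance (key : String) (key_len : Int) (out : List (List Int)) : Decidable (Spec_create_keyMatrix key key_len out) := by unfold Spec_create_keyMatrix; infer_instance

-- ===== CLAIM (what is proved, stated in full; the proofs are below) =====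
def Claim_equal_create_keyMatrix : Prop := ∀ (key : String) (key_len : Int), Dom_create_keyMatrix key key_len → Pre_create_keyMatrix key key_len → Spec_create_keyMatrix key key_len (create_keyMatrix key key_len)

-- ===== LEMMAS AND PROOFS =====

-- the element function both programs apply at flat index k: ord(key[k]) % 65
def pvF (key : String) (k : Int) : Int :=
  PySem.Int.mod (((PySem.Str.pyGet? key k).getD ' ').toNat : Int) 65

theorem take_range' (s k m : Nat) : (List.range' s k).take m = List.range' s (min m k) := by
  induction k generalizing s m with
  | zero => simp
  | succ k ih =>
    cases m with
    | zero => simp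
    | succ m => simp [List.range'_succ, ih, Nat.succ_min_succ]

-- A's inner loop: filling row i in place, left to right, with a running counter
theorem innerFold (F : Int → Int) (n : Nat) (m : List (List Int)) (i : Nat) (hi : i < m.length)
    (k : Int) (hn : n ≤ (m.getD i []).length) :
    (List.range n).foldl
      (fun (st : List (List Int) × Int) (j : Nat) =>
        (st.1.set i ((st.1.getD i []).set j (F st.2)), st.2 + 1)) (m, k)
    = (m.set i (((List.range n).map (fun (j : Nat) => F (k + (j:Int)))) ++ (m.getD i []).drop n), k + n) := by
  induction n with
  | zero =>
    simp [List.getD, List.getElem?_eq_getElem hi]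
  | succ n ih =>
    rw [List.range_succ, List.foldl_append, ih (by omega)]
    simp only [List.foldl_cons, List.foldl_nil]
    have hgetDset : ∀ (r : List Int), (m.set i r).getD i [] = r := by
      intro r; simp [List.getD, hi]
    rw [hgetDset, List.set_set]
    have hlen : ((List.range n).map (fun (j : Nat) => F (k + (j:Int)))).length = n := by simp
    have hdrop : (m.getD i []).drop n = (m.getD i [])[n] :: (m.getD i []).drop (n+1) :=
      List.drop_eq_getElem_cons (by omega)
    congr 1
    · congr 1
      rw [hdrop]
      have hsetapp : ∀ (g : List Int) (x : Int) (rest : List Int) (v : Int), g.length = n →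
          (g ++ x :: rest).set n v = g ++ v :: rest := by
        intro g x rest v hg; subst hg; simp
      rw [hsetapp _ _ _ _ hlen, List.map_append, List.append_assoc]
      simp
    · push_cast; ring

-- A's outer loop: after i rows the matrix is i filled rows followed by n-i zero rows, counter i*n
theorem outerFold (F : Int → Int) (n : Nat) (i : Nat) (hi : i ≤ n) :
    (List.range i).foldl
      (fun (st : List (List Int) × Int) (ii : Nat) =>
        (List.range n).foldl
          (fun (st : List (List Int) × Int) (j : Nat) =>
            (st.1.set ii ((st.1.getD ii []).set j (F st.2)), st.2 + 1)) st)
      (List.replicate n (List.replicate n (0:Int)), 0)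
    = ((List.range i).map (fun i' => (List.range n).map (fun (j : Nat) => F ((i' * n + j : Nat) : Int)))
        ++ (List.replicate n (List.replicate n (0:Int))).drop i,
       ((i * n : Nat) : Int)) := by
  induction i with
  | zero => simp
  | succ i ih =>
    rw [List.range_succ, List.foldl_append, ih (by omega)]
    simp only [List.foldl_cons, List.foldl_nil]
    set Z : List (List Int) := List.replicate n (List.replicate n (0:Int)) with hZ
    have hZlen : Z.length = n := by simp [hZ]
    set done := (List.range i).map (fun i' => (List.range n).map (fun (j : Nat) => F ((i' * n + j : Nat) : Int))) with hdone
    have hdlen : done.length = i := by simp [hdone]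
    have hilt : i < (done ++ Z.drop i).length := by
      simp [hdlen, hZlen]; omega
    have hrow : (done ++ Z.drop i).getD i [] = List.replicate n (0:Int) := by
      rw [show i = done.length from hdlen.symm]
      have h1 : n - done.length = (n - done.length - 1) + 1 := by omega
      simp [List.getD, List.getElem?_append_right, hZ, List.drop_replicate]
      rw [h1, List.replicate_succ]
      simp
    rw [innerFold F n (done ++ Z.drop i) i hilt _ (by rw [hrow]; simp)]
    congr 1
    · rw [hrow]
      rw [show (List.replicate n (0:Int)).drop n = [] from by simp]
      rw [List.append_nil]
      have hZdrop : Z.drop i = Z[i]'(by omega) :: Z.drop (i+1) := List.drop_eq_getElem_cons (by omega)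
      have hZi : Z[i]'(by omega) = List.replicate n (0:Int) := by simp [hZ]
      rw [List.map_append, hZdrop, hZi]
      rw [show i = done.length from hdlen.symm]
      simp [List.append_assoc, hdone]
    · push_cast; ring

theorem create_keyMatrix_eq (key : String) (n : Nat) :
    create_keyMatrix key (n : Int) =
      (List.range n).map (fun i => (List.range n).map (fun (j : Nat) => pvF key ((i * n + j : Nat) : Int))) := by
  unfold create_keyMatrix
  simp only [PySem.List.pyRange_zero_natCast, List.foldl_map, List.map_map,
    Function.comp_def, Int.toNat_natCast, List.map_const', List.length_range]
  have h := outerFold (pvF key) n n (le_refl n)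
  simp only [pvF] at h
  rw [h]
  simp [pvF]

-- B's while-loop on a code list of length exactly r rows of n: it emits the r chunks in order
theorem chunkLoop_eq (n : Int) (hn : 0 < n) (r : Nat) :
    ∀ (codes : List Int) (rows : List (List Int)) (fuel : Nat),
      codes.length = r * n.toNat → codes.length ≤ fuel →
      pvChunkLoop n fuel codes rows
        = rows ++ (List.range r).map (fun i => (codes.drop (i * n.toNat)).take n.toNat) := by
  induction r with
  | zero =>
    intro codes rows fuel hlen _
    have : codes = [] := List.eq_nil_of_length_eq_zero (by omega)
    subst this
    cases fuel <;> simp [pvChunkLoop]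
  | succ r ih =>
    intro codes rows fuel hlen hfuel
    have hnn : 0 < n.toNat := by omega
    have hpos : 0 < codes.length := by
      rw [hlen]; exact Nat.mul_pos (Nat.succ_pos r) hnn
    obtain ⟨f, rfl⟩ : ∃ f, fuel = f + 1 := by
      cases fuel with
      | zero => omega
      | succ f => exact ⟨f, rfl⟩
    have hne : codes ≠ [] := by
      intro h; rw [h] at hpos; simp at hpos
    unfold pvChunkLoop
    simp only [hne, if_false]
    have hcast : (n.toNat : Int) = n := Int.toNat_of_nonneg (le_of_lt hn)
    have hslice_from : PySem.List.slice codes (some n) none = codes.drop n.toNat := by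
      rw [← hcast, PySem.List.slice_from_natCast]; simp; omega
    have hslice_to : PySem.List.slice codes none (some n) = codes.take n.toNat := by
      rw [← hcast, PySem.List.slice_to_natCast]; simp; omega
    rw [hslice_from, hslice_to,
        ih (codes.drop n.toNat) (rows ++ [codes.take n.toNat]) f
          (by simp [hlen, Nat.succ_mul]) (by simp; omega)]
    rw [List.append_assoc]
    congr 1
    rw [List.range_succ_eq_map]
    simp only [List.map_cons, List.map_map, Function.comp_def, Nat.zero_mul, List.drop_zero,
      List.singleton_append]
    congr 1
    apply List.map_congr_left
    intro i _
    rw [List.drop_drop]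
    congr 2
    rw [Nat.succ_mul]
    exact Nat.add_comm _ _

theorem create_keyMatrix_alt_eq (key : String) (n : Nat) (hn : 0 < n)
    (hlen : n * n ≤ key.toList.length) :
    create_keyMatrix_alt key (n : Int) =
      (List.range n).map (fun i => (List.range n).map (fun (j : Nat) => pvF key ((i * n + j : Nat) : Int))) := by
  unfold create_keyMatrix_alt
  rw [if_neg (by exact_mod_cast Nat.not_le.mpr hn)]
  dsimp only
  have hnn : ((n:Int) * n) = ((n*n : Nat) : Int) := by push_cast; ring
  rw [hnn, PySem.List.slice_to_natCast]
  set g : Char → Int := fun c => PySem.Int.mod ((c.toNat : Int)) 65 with hg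
  set codes := (key.toList.take (n*n)).map g with hcodes
  have hclen : codes.length = n * n := by
    simp [hcodes]
    exact String.length_toList ▸ hlen
  -- codes is exactly the flat list of pvF values
  have hflat : codes = (List.range (n*n)).map (fun k => pvF key ((k : Nat) : Int)) := by
    apply List.ext_getElem
    · simp [hclen]
    · intro k hk₁ hk₂
      have hk : k < n * n := by simpa [hclen] using hk₁
      have hk' : k < key.toList.length := lt_of_lt_of_le hk hlen
      simp only [hcodes, List.getElem_map, List.getElem_take, List.getElem_range]
      simp [pvF, PySem.Str.pyGet?, List.getElem?_eq_getElem hk', hg]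
  rw [chunkLoop_eq (n:Int) (by exact_mod_cast hn) n codes [] codes.length
        (by simp [hclen]) (le_refl _)]
  rw [List.nil_append]
  apply List.map_congr_left
  intro i hi
  rw [List.mem_range] at hi
  rw [hflat, Int.toNat_natCast, ← List.map_drop, ← List.map_take,
      List.range_eq_range', List.drop_range', take_range']
  have hmin : min n (n*n - i*n) = n := by
    have h3 : (i+1)*n ≤ n*n := Nat.mul_le_mul_right n hi
    have h4 : (i+1)*n = i*n + n := by ring
    omega
  simp only [Nat.zero_add, hmin, List.range'_eq_map_range, List.map_map]
  apply List.map_congr_left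
  intro j hj
  simp [Function.comp]

-- ===== VERDICT (by name: the statement is the Claim_ definition above) =====
theorem create_keyMatrix_spec : Claim_equal_create_keyMatrix := by
  intro key key_len _ hpre
  unfold Spec_create_keyMatrix
  by_cases hpos : 0 < key_len
  · obtain ⟨n, rfl⟩ := Int.eq_ofNat_of_zero_le (le_of_lt hpos)
    have hn : 0 < n := by exact_mod_cast hpos
    have hlen : n * n ≤ key.toList.length := by
      unfold Pre_create_keyMatrix at hpre
      rcases hpre with h | h
      · exact absurd (by exact_mod_cast h : (n:Int) ≤ 0) (by exact_mod_cast Nat.not_le.mpr hn)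
      · rw [PySem.Str.len_eq] at h
        exact_mod_cast h
    rw [create_keyMatrix_eq, create_keyMatrix_alt_eq key n hn hlen]
  · -- key_len ≤ 0: A's row range is empty, B's guard fires: both are []
    have h0 : key_len.toNat = 0 := by omega
    unfold create_keyMatrix create_keyMatrix_alt
    simp [(by omega : key_len ≤ 0)]
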